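-- pv_equiv track=rewrite | github.com/lucasli233/compsci-373 | quiz12.py | computeErosion8Nbh3x3FlatSE
-- ===== SOURCE A (Python) =====
-- def createInitializedGreyscalePixelArray(image_width, image_height):
--     return [[0]*image_width for _ in range(image_height)]
--
-- def computeErosion8Nbh3x3FlatSE(pixel_array, image_width, image_height):
--     eroded = createInitializedGreyscalePixelArray(image_width, image_height)
--     for i in range(1, image_height-1):
--         for j in range(1, image_width-1):
--             temp = (pixel_array[i-1][j-1] * pixel_array[i-1][j] * pixel_array[i-1][j+1] *
--                     pixel_array[i][j-1] * pixel_array[i][j] * pixel_array[i][j+1] *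
--                     pixel_array[i+1][j-1] * pixel_array[i+1][j] * pixel_array[i+1][j+1])
--
--             if temp != 0:
--                 eroded[i][j] = 1
--             else:
--                 eroded[i][j] = 0
--
--     return eroded
-- ===== SOURCE B (Python) =====
-- def computeErosion8Nbh3x3FlatSE(pixel_array, image_width, image_height):
--     if image_height < 3 or image_width < 3:
--         return [[0] * image_width for _ in range(image_height)]
--     # horizontal pass: H[i][j] = 1 iff row i is all-nonzero on columns j-1..j+1
--     H = [[0] + [1 if row[j - 1] and row[j] and row[j + 1] else 0
--                 for j in range(1, image_width - 1)] + [0]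
--          for row in pixel_array[:image_height]]
--     # vertical pass: combine three H rows, building each output row directly
--     eroded = [[0] * image_width]
--     for i in range(1, image_height - 1):
--         eroded.append([0] + [1 if H[i - 1][j] and H[i][j] and H[i + 1][j] else 0
--                              for j in range(1, image_width - 1)] + [0])
--     eroded.append([0] * image_width)
--     return eroded
-- ===== Notes on version B (the rewrite author's own statement) =====
-- stated objective: alternative
-- what changed: Replaces the single flat 9-neighbour product scan with a separable erosion: a horizontal 3-wide pass building an intermediate 0/1 table H, then a vertical 3-tall pass over H that constructs each output row directly by list building instead of writing into a preallocated zero matrix.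
import Mathlib
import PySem

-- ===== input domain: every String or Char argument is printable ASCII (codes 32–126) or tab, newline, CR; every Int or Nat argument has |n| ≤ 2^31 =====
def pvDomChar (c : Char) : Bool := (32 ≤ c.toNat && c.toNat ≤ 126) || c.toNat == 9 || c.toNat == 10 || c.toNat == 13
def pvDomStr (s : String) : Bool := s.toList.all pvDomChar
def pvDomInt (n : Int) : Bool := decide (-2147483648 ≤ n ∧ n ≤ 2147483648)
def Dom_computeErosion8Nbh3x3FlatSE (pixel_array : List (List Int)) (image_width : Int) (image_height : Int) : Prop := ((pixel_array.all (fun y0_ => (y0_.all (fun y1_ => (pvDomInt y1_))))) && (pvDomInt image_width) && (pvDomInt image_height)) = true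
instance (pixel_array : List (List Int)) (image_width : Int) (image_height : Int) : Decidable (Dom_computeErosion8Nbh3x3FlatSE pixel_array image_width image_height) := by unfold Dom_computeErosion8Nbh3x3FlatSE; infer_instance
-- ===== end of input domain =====

-- B replaces A's single 9-neighbour product scan with a separable erosion: a horizontal
-- 3-wide pass building an intermediate table H, then a vertical 3-tall pass that constructs
-- each output row directly by appends (no in-place matrix mutation); objective: alternative.

-- ===== PORT A =====
-- pixel_array[i][j] (both reads are in range under Pre_)
def pvGet2 (m : List (List Int)) (i j : Int) : Int :=
  PySem.List.pyGetD (PySem.List.pyGetD m i []) j 0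

-- eroded[i][j] = v (reached only with 0 ≤ i,j in range)
def pvSetIJ (m : List (List Int)) (i j : Int) (v : Int) : List (List Int) :=
  m.set i.toNat ((PySem.List.pyGetD m i []).set j.toNat v)

-- createInitializedGreyscalePixelArray: [[0]*w for _ in range(h)]
def pvZeroImage (image_width image_height : Int) : List (List Int) :=
  (PySem.List.pyRange 0 image_height 1).map (fun _ => List.replicate image_width.toNat (0 : Int))

def computeErosion8Nbh3x3FlatSE (pixel_array : List (List Int)) (image_width : Int) (image_height : Int) : List (List Int) :=
  let eroded := pvZeroImage image_width image_height
  (PySem.List.pyRange 1 (image_height - 1) 1).foldl (fun er i =>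
    (PySem.List.pyRange 1 (image_width - 1) 1).foldl (fun er j =>
      let temp := pvGet2 pixel_array (i-1) (j-1) * pvGet2 pixel_array (i-1) j * pvGet2 pixel_array (i-1) (j+1) *
                  pvGet2 pixel_array i (j-1) * pvGet2 pixel_array i j * pvGet2 pixel_array i (j+1) *
                  pvGet2 pixel_array (i+1) (j-1) * pvGet2 pixel_array (i+1) j * pvGet2 pixel_array (i+1) (j+1)
      if temp ≠ 0 then pvSetIJ er i j 1 else pvSetIJ er i j 0) er) eroded

-- ===== PORT B =====
-- one row of the horizontal pass: [0] + [1 if row[j-1] and row[j] and row[j+1] else 0 ...] + [0]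
def pvHRow (row : List Int) (image_width : Int) : List Int :=
  [0] ++ (PySem.List.pyRange 1 (image_width - 1) 1).map (fun j =>
    if PySem.List.pyGetD row (j-1) 0 ≠ 0 ∧ PySem.List.pyGetD row j 0 ≠ 0 ∧ PySem.List.pyGetD row (j+1) 0 ≠ 0
    then (1 : Int) else 0) ++ [0]

def computeErosion8Nbh3x3FlatSE_alt (pixel_array : List (List Int)) (image_width : Int) (image_height : Int) : List (List Int) :=
  if image_height < 3 ∨ image_width < 3 then
    (PySem.List.pyRange 0 image_height 1).map (fun _ => List.replicate image_width.toNat (0 : Int))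
  else
    let H := (PySem.List.slice pixel_array none (some image_height)).map (fun row => pvHRow row image_width)
    let eroded := (PySem.List.pyRange 1 (image_height - 1) 1).foldl (fun er i =>
      er ++ [[0] ++ (PySem.List.pyRange 1 (image_width - 1) 1).map (fun j =>
        if pvGet2 H (i-1) j ≠ 0 ∧ pvGet2 H i j ≠ 0 ∧ pvGet2 H (i+1) j ≠ 0
        then (1 : Int) else 0) ++ [0]]) [List.replicate image_width.toNat (0 : Int)]
    eroded ++ [List.replicate image_width.toNat (0 : Int)]

-- ===== PRECONDITION & SPEC =====
-- Pre_ excludes exactly the inputs on which A raises an IndexError: when there is an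
-- interior pixel (both dimensions ≥ 3), A reads rows 0..image_height-1 and columns
-- 0..image_width-1, so the array must have that many rows and each such row that many columns.
def Pre_computeErosion8Nbh3x3FlatSE (pixel_array : List (List Int)) (image_width : Int) (image_height : Int) : Prop :=
  3 ≤ image_height → 3 ≤ image_width →
    (image_height ≤ (pixel_array.length : Int) ∧
     ∀ r ∈ pixel_array.take image_height.toNat, image_width ≤ (r.length : Int))
instance (pixel_array : List (List Int)) (image_width : Int) (image_height : Int) : Decidable (Pre_computeErosion8Nbh3x3FlatSE pixel_array image_width image_height) := by unfold Pre_computeErosion8Nbh3x3FlatSE; infer_instance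

def pvWitness_computeErosion8Nbh3x3FlatSE : List (List Int) × Int × Int :=
  ([[1,1,1],[1,1,1],[0,1,1]], 3, 3)

def Spec_computeErosion8Nbh3x3FlatSE (pixel_array : List (List Int)) (image_width : Int) (image_height : Int) (out : List (List Int)) : Prop := out = computeErosion8Nbh3x3FlatSE_alt pixel_array image_width image_height
instance (pixel_array : List (List Int)) (image_width : Int) (image_height : Int) (out : List (List Int)) : Decidable (Spec_computeErosion8Nbh3x3FlatSE pixel_array image_width image_height out) := by unfold Spec_computeErosion8Nbh3x3FlatSE; infer_instance

-- ===== CLAIM (what is proved, stated in full; the proofs are below) =====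
def Claim_equal_computeErosion8Nbh3x3FlatSE : Prop := ∀ (pixel_array : List (List Int)) (image_width : Int) (image_height : Int), Dom_computeErosion8Nbh3x3FlatSE pixel_array image_width image_height → Pre_computeErosion8Nbh3x3FlatSE pixel_array image_width image_height → Spec_computeErosion8Nbh3x3FlatSE pixel_array image_width image_height (computeErosion8Nbh3x3FlatSE pixel_array image_width image_height)

-- ===== LEMMAS AND PROOFS =====

-- foldl with an identity-like step is the identity
theorem pv_foldl_id {α β : Type} (l : List β) (a : α) : l.foldl (fun x _ => x) a = a := by
  induction l generalizing a with
  | nil => rfl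
  | cons b l ih => simpa using ih a

-- congruence for foldl under an invariant
theorem pv_foldl_congr_inv {α β : Type} (P : α → Prop) (f g : α → β → α) (l : List β) (a : α)
    (hP : P a) (hpres : ∀ x b, P x → b ∈ l → P (g x b))
    (heq : ∀ x b, P x → b ∈ l → f x b = g x b) :
    l.foldl f a = l.foldl g a := by
  induction l generalizing a with
  | nil => rfl
  | cons b l ih =>
    simp only [List.foldl_cons]
    rw [heq a b hP (by simp)]
    exact ih (g a b) (hpres a b hP (by simp))
      (fun x c hx hc => hpres x c hx (by simp [hc]))
      (fun x c hx hc => heq x c hx (by simp [hc]))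

-- length is preserved by a fold of sets
theorem pv_setFold_length (f : Int → Int) (js : List Int) (row : List Int) :
    (js.foldl (fun r j => r.set j.toNat (f j)) row).length = row.length := by
  induction js generalizing row with
  | nil => rfl
  | cons j js ih => simp [List.foldl_cons, ih]

-- entry of a fold of sets
theorem pv_setFold_getD (f : Int → Int) (js : List Int) (row : List Int) (c : Nat)
    (hnn : ∀ j ∈ js, 0 ≤ j) :
    (js.foldl (fun r j => r.set j.toNat (f j)) row).getD c 0 =
      if (c : Int) ∈ js ∧ c < row.length then f c else row.getD c 0 := by
  induction js generalizing row with
  | nil => simp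
  | cons j js ih =>
    simp only [List.foldl_cons]
    rw [ih _ (fun x hx => hnn x (by simp [hx]))]
    have hj0 : 0 ≤ j := hnn j (by simp)
    have hset : (row.set j.toNat (f j)).getD c 0 =
        if (c : Int) = j ∧ c < row.length then f j else row.getD c 0 := by
      simp only [List.getD_eq_getElem?_getD]
      rw [List.getElem?_set]
      by_cases hjc : j.toNat = c
      · have hcj : (c : Int) = j := by omega
        by_cases hl : c < row.length
        · simp [hjc, hcj, hl]
        · simp [hjc, hcj, hl, List.getElem?_eq_none (by omega : row.length ≤ c)]
      · have hcj : ¬(c : Int) = j := by omega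
        simp [hjc, hcj]
    rw [hset]
    by_cases hl : c < row.length
    · by_cases hc : (c : Int) ∈ js
      · simp [hc, hl, List.length_set]
      · by_cases hcj : (c : Int) = j <;> simp [hc, hcj, hl, List.length_set]
    · simp [hl, List.length_set]

-- a single Python write eroded[i][j] = f j, folded over j, acts on row i only
theorem pv_innerA (f : Int → Int) (js : List Int) (er : List (List Int)) (i : Int)
    (hi0 : 0 ≤ i) (hil : i.toNat < er.length) :
    js.foldl (fun er j => pvSetIJ er i j (f j)) er =
      er.set i.toNat (js.foldl (fun r j => r.set j.toNat (f j)) (er.getD i.toNat [])) := by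
  induction js generalizing er with
  | nil =>
    simp only [List.foldl_nil]
    rw [List.getD_eq_getElem _ _ hil, List.set_getElem_self]
  | cons j js ih =>
    simp only [List.foldl_cons]
    have hpy : PySem.List.pyGetD er i [] = er.getD i.toNat [] := by
      rw [PySem.List.pyGetD_eq_getElem er [] hi0 (by omega)]
      rw [List.getD_eq_getElem _ _ hil]
    rw [show pvSetIJ er i j (f j) = er.set i.toNat ((er.getD i.toNat []).set j.toNat (f j)) by
      simp [pvSetIJ, hpy]]
    rw [ih _ (by simpa using hil)]
    rw [List.set_set]
    congr 1
    rw [List.getD_eq_getElem _ _ (by simpa using hil),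
        List.getElem_set_self (by simpa using hil), List.getD_eq_getElem _ _ hil]

-- entry of the full nested fold (rows processed independently)
theorem pv_matFold_getD (f : Int → Int → Int) (is js : List Int) (er : List (List Int)) (r c : Nat)
    (hnni : ∀ i ∈ is, 0 ≤ i) (hnnj : ∀ j ∈ js, 0 ≤ j) :
    ((is.foldl (fun er i =>
        er.set i.toNat (js.foldl (fun row j => row.set j.toNat (f i j)) (er.getD i.toNat []))) er).getD r []).getD c 0 =
      if (r : Int) ∈ is ∧ r < er.length ∧ (c : Int) ∈ js ∧ c < (er.getD r []).length
      then f r c else (er.getD r []).getD c 0 := by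
  induction is generalizing er with
  | nil => simp
  | cons i is ih =>
    simp only [List.foldl_cons]
    have hi0 : 0 ≤ i := hnni i (by simp)
    set er' := er.set i.toNat (js.foldl (fun row j => row.set j.toNat (f i j)) (er.getD i.toNat [])) with her'
    rw [ih er' (fun x hx => hnni x (by simp [hx]))]
    have hlen' : er'.length = er.length := by simp [her']
    have hget : er'.getD r [] =
        if i.toNat = r ∧ r < er.length
        then js.foldl (fun row j => row.set j.toNat (f i j)) (er.getD r [])
        else er.getD r [] := by
      simp only [her', List.getD_eq_getElem?_getD]
      rw [List.getElem?_set]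
      by_cases hir : i.toNat = r
      · by_cases hl : r < er.length
        · simp [hir, hl, List.getElem?_eq_getElem hl, List.getD_eq_getElem _ _ hl]
        · simp [hir, hl, List.getElem?_eq_none (by omega : er.length ≤ r)]
      · simp [hir]
    by_cases hir : i.toNat = r ∧ r < er.length
    · have hieq : i = (r : Int) := by omega
      rw [hget, if_pos hir]
      rw [pv_setFold_getD _ _ _ _ hnnj, pv_setFold_length]
      by_cases hcc : (c : Int) ∈ js ∧ c < (er.getD r []).length
      · by_cases hris : (r : Int) ∈ is <;>
          simp [hlen', hcc.1, hcc.2, hir.2, hris, hieq, List.mem_cons] <;>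
          (intro h1 h2; exact absurd h2 (by omega))
      · have h1 : ¬((r:Int) ∈ is ∧ r < er.length ∧ (c:Int) ∈ js ∧ c < (er.getD r []).length) := by
          tauto
        have h2 : ¬(((r:Int) = i ∨ (r:Int) ∈ is) ∧ r < er.length ∧ (c:Int) ∈ js ∧ c < (er.getD r []).length) := by
          tauto
        simp only [hlen', List.mem_cons]
        rw [if_neg h1, if_neg hcc, if_neg h2]
    · rw [hget, if_neg hir]
      by_cases hri2 : (r : Int) = i
      · have : ¬ r < er.length := by omega
        simp [hlen', this]
      · simp [hlen', List.mem_cons, hri2]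

-- invariant preserved by a fold
theorem pv_foldl_pres {α β : Type} (P : α → Prop) (g : α → β → α) (l : List β) (a : α)
    (hP : P a) (hpres : ∀ x b, P x → b ∈ l → P (g x b)) : P (l.foldl g a) := by
  induction l generalizing a with
  | nil => exact hP
  | cons b l ih =>
    exact ih (g a b) (hpres a b hP (by simp))
      (fun x c hx hc => hpres x c hx (by simp [hc]))

-- shape invariant of the eroded matrix
def pvShape (w h : Int) (er : List (List Int)) : Prop :=
  er.length = h.toNat ∧ ∀ row ∈ er, row.length = w.toNat

theorem pv_zero_shape (w h : Int) : pvShape w h (pvZeroImage w h) := by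
  constructor
  · simp [pvZeroImage, PySem.List.length_pyRange_one]
  · intro row hrow
    simp only [pvZeroImage, List.mem_map] at hrow
    obtain ⟨_, _, rfl⟩ := hrow
    simp

theorem pv_zero_getD (w h : Int) (r : Nat) :
    (pvZeroImage w h).getD r [] = if r < h.toNat then List.replicate w.toNat (0:Int) else [] := by
  simp only [pvZeroImage, List.getD_eq_getElem?_getD, List.getElem?_map]
  by_cases hr : r < h.toNat
  · rw [List.getElem?_eq_getElem (by simpa [PySem.List.length_pyRange_one] using hr)]
    simp [hr]
  · rw [List.getElem?_eq_none (by simpa [PySem.List.length_pyRange_one] using Nat.le_of_not_lt hr)]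
    simp [hr]

-- the canonical (characterized) outer step
def pvStep (pa : List (List Int)) (w : Int) (er : List (List Int)) (i : Int) : List (List Int) :=
  er.set i.toNat ((PySem.List.pyRange 1 (w-1) 1).foldl
    (fun row j => row.set j.toNat
      (if pvGet2 pa (i-1) (j-1) * pvGet2 pa (i-1) j * pvGet2 pa (i-1) (j+1) *
          pvGet2 pa i (j-1) * pvGet2 pa i j * pvGet2 pa i (j+1) *
          pvGet2 pa (i+1) (j-1) * pvGet2 pa (i+1) j * pvGet2 pa (i+1) (j+1) ≠ 0
       then (1:Int) else 0)) (er.getD i.toNat []))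

theorem pv_step_shape (pa : List (List Int)) (w h : Int) (er : List (List Int)) (i : Int)
    (hP : pvShape w h er) (hi : 0 ≤ i ∧ i < h) : pvShape w h (pvStep pa w er i) := by
  obtain ⟨hl, hr⟩ := hP
  constructor
  · simp [pvStep, hl]
  · intro row hrow
    rcases List.mem_or_eq_of_mem_set hrow with h1 | h1
    · exact hr row h1
    · subst h1
      rw [pv_setFold_length]
      have hil : i.toNat < er.length := by omega
      rw [List.getD_eq_getElem _ _ hil]
      exact hr _ (List.getElem_mem hil)

-- port A's fold equals the canonical fold
theorem pv_A_eq_canon (pa : List (List Int)) (w h : Int) :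
    computeErosion8Nbh3x3FlatSE pa w h =
      (PySem.List.pyRange 1 (h-1) 1).foldl (pvStep pa w) (pvZeroImage w h) := by
  show (PySem.List.pyRange 1 (h-1) 1).foldl _ (pvZeroImage w h) = _
  apply pv_foldl_congr_inv (pvShape w h)
  · exact pv_zero_shape w h
  · intro er i hP hi
    rw [PySem.List.mem_pyRange_one] at hi
    exact pv_step_shape pa w h er i hP ⟨by omega, by omega⟩
  · intro er i hP hi
    rw [PySem.List.mem_pyRange_one] at hi
    have hi0 : 0 ≤ i := by omega
    have hil : i.toNat < er.length := by
      obtain ⟨hl, _⟩ := hP; omega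
    unfold pvStep
    rw [← pv_innerA _ _ er i hi0 hil]
    apply pv_foldl_congr_inv (fun _ => True) _ _ _ _ trivial (fun _ _ _ _ => trivial)
    intro er' j _ _
    exact (apply_ite (pvSetIJ er' i j) _ 1 0).symm

-- characterization of port A
theorem pv_A_char (pa : List (List Int)) (w h : Int) (r c : Nat)
    (hh : 3 ≤ h) (hw : 3 ≤ w) :
    ((computeErosion8Nbh3x3FlatSE pa w h).getD r []).getD c 0 =
      if 1 ≤ (r:Int) ∧ (r:Int) < h - 1 ∧ 1 ≤ (c:Int) ∧ (c:Int) < w - 1 then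
        (if pvGet2 pa ((r:Int)-1) ((c:Int)-1) * pvGet2 pa ((r:Int)-1) (c:Int) * pvGet2 pa ((r:Int)-1) ((c:Int)+1) *
            pvGet2 pa (r:Int) ((c:Int)-1) * pvGet2 pa (r:Int) (c:Int) * pvGet2 pa (r:Int) ((c:Int)+1) *
            pvGet2 pa ((r:Int)+1) ((c:Int)-1) * pvGet2 pa ((r:Int)+1) (c:Int) * pvGet2 pa ((r:Int)+1) ((c:Int)+1) ≠ 0
         then (1:Int) else 0)
      else 0 := by
  rw [pv_A_eq_canon]
  unfold pvStep
  rw [pv_matFold_getD _ _ _ _ r c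
    (fun i hi => by rw [PySem.List.mem_pyRange_one] at hi; omega)
    (fun j hj => by rw [PySem.List.mem_pyRange_one] at hj; omega)]
  have hlen0 : (pvZeroImage w h).length = h.toNat := (pv_zero_shape w h).1
  rw [pv_zero_getD]
  by_cases hint : 1 ≤ (r:Int) ∧ (r:Int) < h - 1 ∧ 1 ≤ (c:Int) ∧ (c:Int) < w - 1
  · have hr : r < h.toNat := by omega
    have hc : c < w.toNat := by omega
    rw [if_pos hr]
    rw [if_pos ⟨by rw [PySem.List.mem_pyRange_one]; omega,
        by omega, by rw [PySem.List.mem_pyRange_one]; omega, by simpa using hc⟩]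
    rw [if_pos hint]
  · rw [if_neg hint]
    by_cases hr : r < h.toNat
    · rw [if_pos hr]
      rw [if_neg (by
        rintro ⟨h1, h2, h3, h4⟩
        rw [PySem.List.mem_pyRange_one] at h1 h3
        exact hint ⟨by omega, by omega, by omega, by omega⟩)]
      simp
    · rw [if_neg hr]
      rw [if_neg (by rintro ⟨h1, h2, h3, h4⟩; rw [hlen0] at h2; omega)]
      simp

-- matrices agreeing in shape and entries are equal
theorem pv_mat_ext (m1 m2 : List (List Int)) (hl : m1.length = m2.length)
    (hrl : ∀ r : Nat, (m1.getD r []).length = (m2.getD r []).length)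
    (he : ∀ r c : Nat, ((m1.getD r []).getD c 0) = ((m2.getD r []).getD c 0)) :
    m1 = m2 := by
  apply List.ext_getElem hl
  intro r h1 h2
  have hrow : (m1.getD r []) = m1[r] := List.getD_eq_getElem m1 [] h1
  have hrow2 : (m2.getD r []) = m2[r] := List.getD_eq_getElem m2 [] h2
  apply List.ext_getElem (by rw [← hrow, ← hrow2]; exact hrl r)
  intro c hc1 hc2
  have := he r c
  rw [hrow, hrow2, List.getD_eq_getElem _ _ hc1, List.getD_eq_getElem _ _ hc2] at this
  exact this

-- a framed row [0] ++ map ++ [0]: length and entries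
theorem pv_frame_len (g : Int → Int) (w : Int) (hw : 3 ≤ w) :
    ([(0:Int)] ++ (PySem.List.pyRange 1 (w-1) 1).map g ++ [0]).length = w.toNat := by
  simp [PySem.List.length_pyRange_one]
  omega

theorem pv_frame_getD (g : Int → Int) (w : Int) (hw : 3 ≤ w) (c : Nat) :
    ([(0:Int)] ++ (PySem.List.pyRange 1 (w-1) 1).map g ++ [0]).getD c 0 =
      if 1 ≤ c ∧ (c:Int) < w - 1 then g (c:Int) else 0 := by
  match c with
  | 0 => simp
  | Nat.succ c' =>
    rw [show [(0:Int)] ++ (PySem.List.pyRange 1 (w-1) 1).map g ++ [0] =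
        (0:Int) :: ((PySem.List.pyRange 1 (w-1) 1).map g ++ [0]) by simp]
    rw [List.getD_cons_succ]
    by_cases hc : c' < ((PySem.List.pyRange 1 (w-1) 1).map g).length
    · rw [List.getD_append _ _ _ _ hc]
      have hc' : c' < (PySem.List.pyRange 1 (w-1) 1).length := by simpa using hc
      rw [List.getD_eq_getElem _ _ hc, List.getElem_map,
        PySem.List.getElem_pyRange_one _ _ _ hc']
      rw [PySem.List.length_pyRange_one] at hc'
      rw [if_pos ⟨by omega, by omega⟩]
      congr 1
      omega
    · rw [List.getD_append_right _ _ _ _ (by omega)]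
      have hlen : ((PySem.List.pyRange 1 (w-1) 1).map g).length = (w-2).toNat := by
        simp [PySem.List.length_pyRange_one]
        omega
      rw [hlen] at hc ⊢
      have hc2 : ¬ (1 ≤ c' + 1 ∧ ((c' + 1 : Nat) : Int) < w - 1) := by
        rintro ⟨h1, h2⟩; omega
      rw [if_neg (by simpa using hc2)]
      rcases Nat.eq_or_lt_of_le (Nat.le_of_not_lt hc) with h | h
      · rw [← h, Nat.sub_self, List.getD_cons_zero]
      · rw [List.getD_eq_default ([(0:Int)]) _ (by simp; omega)]

-- reduction of a read from the horizontal table H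
theorem pv_H_get (pa : List (List Int)) (w h : Int) (i : Int) (c : Nat)
    (hw : 3 ≤ w) (hlen : h ≤ (pa.length : Int)) (hi0 : 0 ≤ i) (hih : i < h)
    (hc1 : 1 ≤ c) (hc2 : (c:Int) < w - 1) :
    pvGet2 ((PySem.List.slice pa none (some h)).map (fun row => pvHRow row w)) i (c:Int) =
      if pvGet2 pa i ((c:Int)-1) ≠ 0 ∧ pvGet2 pa i (c:Int) ≠ 0 ∧ pvGet2 pa i ((c:Int)+1) ≠ 0
      then (1:Int) else 0 := by
  have h0h : (0:Int) ≤ h := by omega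
  rw [PySem.List.slice_to pa h0h]
  have htl : (pa.take h.toNat).length = h.toNat := by simp; omega
  unfold pvGet2
  rw [PySem.List.pyGetD_eq_getElem _ _ hi0 (by simp [htl]; omega)]
  rw [List.getElem_map]
  simp only [List.getElem_take]
  rw [show pvHRow (pa[i.toNat]'(by omega)) w = [(0:Int)] ++ (PySem.List.pyRange 1 (w-1) 1).map
      (fun j => if PySem.List.pyGetD (pa[i.toNat]'(by omega)) (j-1) 0 ≠ 0 ∧
        PySem.List.pyGetD (pa[i.toNat]'(by omega)) j 0 ≠ 0 ∧
        PySem.List.pyGetD (pa[i.toNat]'(by omega)) (j+1) 0 ≠ 0 then (1:Int) else 0) ++ [0] from rfl]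
  rw [PySem.List.pyGetD_natCast]
  rw [pv_frame_getD _ _ hw c]
  rw [if_pos ⟨hc1, hc2⟩]
  have hpa : PySem.List.pyGetD pa i [] = pa[i.toNat]'(by omega) :=
    PySem.List.pyGetD_eq_getElem _ _ hi0 (by omega)
  rw [hpa]

-- the (0/1)-ite is nonzero iff its condition holds
theorem pv_ite10_ne (P : Prop) [Decidable P] : ((if P then (1:Int) else 0) ≠ 0) ↔ P := by
  split_ifs with h <;> simp [h]

-- a product of nine integers is nonzero iff every factor is
theorem pv_prod9 (a b c d e f g h i : Int) :
    a*b*c*d*e*f*g*h*i ≠ 0 ↔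
      (a ≠ 0 ∧ b ≠ 0 ∧ c ≠ 0) ∧ (d ≠ 0 ∧ e ≠ 0 ∧ f ≠ 0) ∧ (g ≠ 0 ∧ h ≠ 0 ∧ i ≠ 0) := by
  simp [mul_ne_zero_iff]
  tauto

-- port B unfolded to a cons/append normal form (main case)
theorem pv_B_eq_norm (pa : List (List Int)) (w h : Int) (hh : 3 ≤ h) (hw : 3 ≤ w) :
    computeErosion8Nbh3x3FlatSE_alt pa w h =
      List.replicate w.toNat (0:Int) ::
        ((PySem.List.pyRange 1 (h-1) 1).map (fun i =>
          [(0:Int)] ++ (PySem.List.pyRange 1 (w-1) 1).map (fun j =>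
            if pvGet2 ((PySem.List.slice pa none (some h)).map (fun row => pvHRow row w)) (i-1) j ≠ 0 ∧
               pvGet2 ((PySem.List.slice pa none (some h)).map (fun row => pvHRow row w)) i j ≠ 0 ∧
               pvGet2 ((PySem.List.slice pa none (some h)).map (fun row => pvHRow row w)) (i+1) j ≠ 0
            then (1:Int) else 0) ++ [0]) ++ [List.replicate w.toNat (0:Int)]) := by
  rw [show computeErosion8Nbh3x3FlatSE_alt pa w h =
      ((PySem.List.pyRange 1 (h-1) 1).foldl (fun er i =>
        er ++ [[0] ++ (PySem.List.pyRange 1 (w-1) 1).map (fun j =>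
          if pvGet2 ((PySem.List.slice pa none (some h)).map (fun row => pvHRow row w)) (i-1) j ≠ 0 ∧
             pvGet2 ((PySem.List.slice pa none (some h)).map (fun row => pvHRow row w)) i j ≠ 0 ∧
             pvGet2 ((PySem.List.slice pa none (some h)).map (fun row => pvHRow row w)) (i+1) j ≠ 0
          then (1:Int) else 0) ++ [0]]) [List.replicate w.toNat (0:Int)]) ++
        [List.replicate w.toNat (0:Int)] by
    unfold computeErosion8Nbh3x3FlatSE_alt
    rw [if_neg (by omega)]]
  rw [PySem.List.foldl_append_singleton_eq_map]
  simp

-- entry of port B (main case)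
theorem pv_B_entry (pa : List (List Int)) (w h : Int) (r c : Nat)
    (hh : 3 ≤ h) (hw : 3 ≤ w) :
    ((computeErosion8Nbh3x3FlatSE_alt pa w h).getD r []).getD c 0 =
      if 1 ≤ (r:Int) ∧ (r:Int) < h - 1 ∧ 1 ≤ c ∧ (c:Int) < w - 1 then
        (if pvGet2 ((PySem.List.slice pa none (some h)).map (fun row => pvHRow row w)) ((r:Int)-1) (c:Int) ≠ 0 ∧
            pvGet2 ((PySem.List.slice pa none (some h)).map (fun row => pvHRow row w)) (r:Int) (c:Int) ≠ 0 ∧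
            pvGet2 ((PySem.List.slice pa none (some h)).map (fun row => pvHRow row w)) ((r:Int)+1) (c:Int) ≠ 0
         then (1:Int) else 0)
      else 0 := by
  rw [pv_B_eq_norm pa w h hh hw]
  match r with
  | 0 =>
    rw [List.getD_cons_zero]
    rw [if_neg (by rintro ⟨h1, _⟩; omega)]
    by_cases hc : c < w.toNat
    · rw [List.getD_replicate _ (by simpa using hc)]
    · rw [List.getD_eq_default _ _ (by simpa using Nat.le_of_not_lt hc)]
  | Nat.succ r' =>
    simp only [Nat.succ_eq_add_one]
    rw [List.getD_cons_succ]
    set F : Int → List Int := (fun i =>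
      [(0:Int)] ++ (PySem.List.pyRange 1 (w-1) 1).map (fun j =>
        if pvGet2 ((PySem.List.slice pa none (some h)).map (fun row => pvHRow row w)) (i-1) j ≠ 0 ∧
           pvGet2 ((PySem.List.slice pa none (some h)).map (fun row => pvHRow row w)) i j ≠ 0 ∧
           pvGet2 ((PySem.List.slice pa none (some h)).map (fun row => pvHRow row w)) (i+1) j ≠ 0
        then (1:Int) else 0) ++ [0]) with hF
    by_cases hr : r' < (PySem.List.pyRange 1 (h-1) 1).length
    · rw [List.getD_append ((PySem.List.pyRange 1 (h-1) 1).map F)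
        [List.replicate w.toNat (0:Int)] [] r' (by simpa using hr)]
      rw [List.getD_eq_getElem ((PySem.List.pyRange 1 (h-1) 1).map F) []
        (by simpa using hr), List.getElem_map,
        PySem.List.getElem_pyRange_one _ _ _ hr]
      rw [PySem.List.length_pyRange_one] at hr
      rw [hF]
      simp only []
      rw [pv_frame_getD _ _ hw c]
      rw [show (1:Int) + (r':Int) = (((r' + 1 : Nat)) : Int) by push_cast; ring]
      by_cases hcc : 1 ≤ c ∧ (c:Int) < w - 1
      · have hcond : 1 ≤ (((r' + 1 : Nat)) : Int) ∧ (((r' + 1 : Nat)) : Int) < h - 1 ∧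
            1 ≤ c ∧ (c : Int) < w - 1 :=
          ⟨by push_cast; omega, by push_cast; omega, hcc.1, hcc.2⟩
        rw [if_pos hcc, if_pos hcond]
      · rw [if_neg hcc, if_neg (by rintro ⟨_, _, h3, h4⟩; exact hcc ⟨h3, h4⟩)]
    · rw [List.getD_append_right ((PySem.List.pyRange 1 (h-1) 1).map F)
        [List.replicate w.toNat (0:Int)] [] r' (by simpa using Nat.le_of_not_lt hr)]
      rw [PySem.List.length_pyRange_one] at hr
      rw [if_neg (by rintro ⟨_, h2, _⟩; push_cast at h2; omega)]
      rw [show ((PySem.List.pyRange 1 (h-1) 1).map F).length = (h-1-1).toNat by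
        simp [PySem.List.length_pyRange_one]]
      rcases Nat.eq_or_lt_of_le (Nat.le_of_not_lt hr) with h1 | h1
      · rw [← h1, Nat.sub_self, List.getD_cons_zero]
        by_cases hc : c < w.toNat
        · rw [List.getD_replicate _ (by simpa using hc)]
        · rw [List.getD_eq_default _ _ (by simpa using Nat.le_of_not_lt hc)]
      · rw [List.getD_eq_default ([List.replicate w.toNat (0:Int)]) _ (by simp; omega)]
        simp

-- row lengths of a matrix with uniform rows, through getD
theorem pv_getD_len (m : List (List Int)) (W : Nat) (hw : ∀ row ∈ m, row.length = W) (r : Nat) :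
    (m.getD r []).length = if r < m.length then W else 0 := by
  by_cases hr : r < m.length
  · rw [List.getD_eq_getElem _ _ hr, if_pos hr]
    exact hw _ (List.getElem_mem hr)
  · rw [List.getD_eq_default _ _ (Nat.le_of_not_lt hr), if_neg hr]
    rfl

-- all rows of port B (main case) have length w.toNat
theorem pv_B_rows (pa : List (List Int)) (w h : Int) (hh : 3 ≤ h) (hw : 3 ≤ w) :
    ∀ row ∈ computeErosion8Nbh3x3FlatSE_alt pa w h, row.length = w.toNat := by
  rw [pv_B_eq_norm pa w h hh hw]
  intro row hrow
  rcases List.mem_cons.mp hrow with h1 | h1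
  · subst h1; simp
  · rcases List.mem_append.mp h1 with h2 | h2
    · obtain ⟨i, _, rfl⟩ := List.mem_map.mp h2
      exact pv_frame_len _ w hw
    · rcases List.mem_singleton.mp h2 with rfl
      simp

theorem pv_B_len (pa : List (List Int)) (w h : Int) (hh : 3 ≤ h) (hw : 3 ≤ w) :
    (computeErosion8Nbh3x3FlatSE_alt pa w h).length = h.toNat := by
  rw [pv_B_eq_norm pa w h hh hw]
  simp [PySem.List.length_pyRange_one]
  omega

-- shape of port A
theorem pv_A_shape (pa : List (List Int)) (w h : Int) :
    pvShape w h (computeErosion8Nbh3x3FlatSE pa w h) := by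
  rw [pv_A_eq_canon]
  exact pv_foldl_pres _ _ _ _ (pv_zero_shape w h)
    (fun x b hx hb => pv_step_shape pa w h x b hx (by
      rw [PySem.List.mem_pyRange_one] at hb
      exact ⟨by omega, by omega⟩))

-- ===== VERDICT (by name: the statement is the Claim_ definition above) =====
theorem computeErosion8Nbh3x3FlatSE_spec : Claim_equal_computeErosion8Nbh3x3FlatSE := by
  unfold Claim_equal_computeErosion8Nbh3x3FlatSE
  intro pa w h _ hpre
  unfold Spec_computeErosion8Nbh3x3FlatSE
  by_cases hsm : h < 3 ∨ w < 3
  · have hB : computeErosion8Nbh3x3FlatSE_alt pa w h = pvZeroImage w h := by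
      unfold computeErosion8Nbh3x3FlatSE_alt pvZeroImage
      rw [if_pos hsm]
    have hA : computeErosion8Nbh3x3FlatSE pa w h = pvZeroImage w h := by
      rw [pv_A_eq_canon]
      rcases hsm with hsm | hsm
      · rw [PySem.List.pyRange_one_eq_nil (by omega : h - 1 ≤ 1)]
        rfl
      · have hid : (PySem.List.pyRange 1 (h-1) 1).foldl (pvStep pa w) (pvZeroImage w h) =
            (PySem.List.pyRange 1 (h-1) 1).foldl (fun er _ => er) (pvZeroImage w h) :=
          pv_foldl_congr_inv (pvShape w h) _ _ _ _ (pv_zero_shape w h) (fun x _ hx _ => hx)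
            (fun er i hP hi => by
              rw [PySem.List.mem_pyRange_one] at hi
              unfold pvStep
              rw [PySem.List.pyRange_one_eq_nil (by omega : w - 1 ≤ 1)]
              simp only [List.foldl_nil]
              rw [List.getD_eq_getElem _ _ (by obtain ⟨hl, _⟩ := hP; omega),
                List.set_getElem_self])
        rw [hid, pv_foldl_id]
    rw [hA, hB]
  · push_neg at hsm
    have hh : 3 ≤ h := by omega
    have hw : 3 ≤ w := by omega
    obtain ⟨hlen, hrows⟩ := hpre hh hw
    apply pv_mat_ext
    · rw [(pv_A_shape pa w h).1, pv_B_len pa w h hh hw]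
    · intro r
      rw [pv_getD_len _ w.toNat (pv_A_shape pa w h).2 r,
        pv_getD_len _ w.toNat (pv_B_rows pa w h hh hw) r,
        (pv_A_shape pa w h).1, pv_B_len pa w h hh hw]
    · intro r c
      rw [pv_A_char pa w h r c hh hw, pv_B_entry pa w h r c hh hw]
      by_cases hint : 1 ≤ (r:Int) ∧ (r:Int) < h - 1 ∧ 1 ≤ c ∧ (c:Int) < w - 1
      · have hintA : 1 ≤ (r:Int) ∧ (r:Int) < h - 1 ∧ 1 ≤ (c:Int) ∧ (c:Int) < w - 1 :=
          ⟨hint.1, hint.2.1, by omega, hint.2.2.2⟩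
        rw [if_pos hintA, if_pos hint]
        rw [pv_H_get pa w h ((r:Int)-1) c hw hlen (by omega) (by omega) hint.2.2.1 hint.2.2.2,
          pv_H_get pa w h (r:Int) c hw hlen (by omega) (by omega) hint.2.2.1 hint.2.2.2,
          pv_H_get pa w h ((r:Int)+1) c hw hlen (by omega) (by omega) hint.2.2.1 hint.2.2.2]
        simp only [pv_ite10_ne]
        exact if_congr (pv_prod9 _ _ _ _ _ _ _ _ _) rfl rfl
      · rw [if_neg (by rintro ⟨h1, h2, h3, h4⟩; exact hint ⟨h1, h2, by omega, h4⟩),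
          if_neg hint]
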